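-- pv_equiv track=rewrite | github.com/UDC-GAC/ServerlessYARN | ansible/provisioning/services/serverless_containers_web/ui/views.py | getFreestDisk
-- ===== SOURCE A (Python) =====
-- def getFreestDisk(host):
--
--     freest_disk = None
--
--     ## Based on load
--     # current_min_load = -1
--
--     # disk_type_load_ratio = {}
--     # for disk_type in max_load_dict:
--     #     disk_type_load_ratio[disk_type] = max_load_dict["LVM"]/max_load_dict[disk_type]
--
--     # if 'disks' in host['resources']:
--     #     for disk_name in host['resources']['disks']:
--
--     #         disk = host['resources']['disks'][disk_name]
--
--     #         if disk['load'] == 0: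
--     #             freest_disk = disk_name
--     #             break
--
--     #         if (disk['load'] == max_load_dict[disk['type']]): continue
--
--     #         adjusted_load = disk['load'] * disk_type_load_ratio[disk['type']]
--
--     #         if current_min_load == -1 or adjusted_load < current_min_load:
--     #             current_min_load = adjusted_load
--     #             freest_disk = disk_name
--
--     ## Based on Bandwidth
--     current_max_bw = -1
--
--     if 'disks' in host['resources']:
--         for disk_name in host['resources']['disks']:
--
--             disk = host['resources']['disks'][disk_name]
--
--             if (disk['free'] == 0): continue
--
--             ## TODO: think if it is better to assign a disk with no containers but low bandwidth or a contended disk with high bw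
--             if disk['free'] == disk['max']:
--                 freest_disk = disk_name
--                 break
--
--             if current_max_bw == -1 or disk['free'] > current_max_bw:
--                 current_max_bw = disk['free']
--                 freest_disk = disk_name
--
--     return freest_disk
-- ===== SOURCE B (Python) =====
-- def getFreestDisk(host):
--     disks = host['resources'].get('disks', {})
--     # Pass 1: a fully-free disk anywhere wins (A's break rule).
--     for disk_name, disk in disks.items():
--         if disk['free'] != 0 and disk['free'] == disk['max']:
--             return disk_name
--     # Pass 2: otherwise the first disk with the strictly largest free bandwidth.
--     best = None
--     best_bw = -1
--     for disk_name, disk in disks.items():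
--         f = disk['free']
--         if f != 0 and (best_bw == -1 or f > best_bw):
--             best_bw = f
--             best = disk_name
--     return best
-- ===== Notes on version B (the rewrite author's own statement) =====
-- stated objective: simpler
-- what changed: B splits A's interleaved single loop into two independent passes: a first pass returning the first fully-free disk (A's break rule), and, only if none exists, a second pass tracking the maximum free bandwidth with the -1 sentinel and strict > tie rule.
import Mathlib
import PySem

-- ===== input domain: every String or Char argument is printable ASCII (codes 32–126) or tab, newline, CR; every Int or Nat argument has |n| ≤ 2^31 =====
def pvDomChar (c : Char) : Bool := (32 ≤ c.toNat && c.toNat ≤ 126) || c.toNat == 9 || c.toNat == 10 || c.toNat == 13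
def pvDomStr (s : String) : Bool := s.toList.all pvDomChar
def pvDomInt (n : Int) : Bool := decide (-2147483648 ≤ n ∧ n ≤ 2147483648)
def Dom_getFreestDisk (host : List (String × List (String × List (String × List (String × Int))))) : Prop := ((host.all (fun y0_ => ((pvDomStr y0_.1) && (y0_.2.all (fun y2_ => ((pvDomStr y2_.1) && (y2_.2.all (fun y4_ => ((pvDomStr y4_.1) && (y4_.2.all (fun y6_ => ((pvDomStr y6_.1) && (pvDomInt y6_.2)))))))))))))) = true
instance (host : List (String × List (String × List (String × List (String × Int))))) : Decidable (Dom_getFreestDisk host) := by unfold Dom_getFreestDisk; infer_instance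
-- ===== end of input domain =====

-- B splits A's interleaved loop into two passes (full-disk early return, then max-free scan); same cost, plainer rule.

-- ===== PORT A =====
-- A's single loop: skip free==0, break (returning the name) on free==max, else track max free with the -1 sentinel.
def goA : List (String × List (String × Int)) → Option String → Int → Option String
  | [], best, _ => best
  | (n, d) :: rest, best, bw =>
    let f := (PySem.Dict.ofList d).getD "free" 0
    if f = 0 then goA rest best bw
    else if f = (PySem.Dict.ofList d).getD "max" 0 then some n
    else if bw = -1 ∨ bw < f then goA rest (some n) f
    else goA rest best bw

def getFreestDisk (host : List (String × List (String × List (String × List (String × Int))))) : Option String :=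
  match (PySem.Dict.ofList host).get? "resources" with
  | none => none   -- KeyError in Python; outside Pre_
  | some res =>
    match (PySem.Dict.ofList res).get? "disks" with
    | none => none  -- 'disks' not in resources: freest_disk stays None
    | some disks => goA (PySem.Dict.ofList disks).items none (-1)

-- ===== PORT B =====
-- first pass: the first disk with free != 0 and free == max
def firstFull : List (String × List (String × Int)) → Option String
  | [] => none
  | (n, d) :: rest =>
    if (PySem.Dict.ofList d).getD "free" 0 ≠ 0 ∧
       (PySem.Dict.ofList d).getD "free" 0 = (PySem.Dict.ofList d).getD "max" 0 then some n
    else firstFull rest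

-- second pass: first disk with the strictly largest nonzero free bandwidth (-1 sentinel)
def bestBw : List (String × List (String × Int)) → Option String → Int → Option String
  | [], best, _ => best
  | (n, d) :: rest, best, bw =>
    let f := (PySem.Dict.ofList d).getD "free" 0
    if f ≠ 0 ∧ (bw = -1 ∨ bw < f) then bestBw rest (some n) f
    else bestBw rest best bw

def getFreestDisk_alt (host : List (String × List (String × List (String × List (String × Int))))) : Option String :=
  match (PySem.Dict.ofList host).get? "resources" with
  | none => none   -- KeyError in Python; outside Pre_
  | some res =>
    let items := (PySem.Dict.ofList ((PySem.Dict.ofList res).getD "disks" [])).items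
    match firstFull items with
    | some n => some n
    | none => bestBw items none (-1)

-- ===== PRECONDITION & SPEC =====
-- a disk entry is readable for the loop body: 'free' present, and 'max' present when free != 0
def diskOk (d : List (String × Int)) : Bool :=
  (PySem.Dict.ofList d).contains "free" &&
  (((PySem.Dict.ofList d).getD "free" 0 == 0) || (PySem.Dict.ofList d).contains "max")
-- a fully-free disk (where the loop returns early)
def diskFull (d : List (String × Int)) : Bool :=
  (PySem.Dict.ofList d).contains "free" &&
  ((PySem.Dict.ofList d).getD "free" 0 != 0) &&
  ((PySem.Dict.ofList d).getD "free" 0 == (PySem.Dict.ofList d).getD "max" 0)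
-- Pre_ excludes exactly the KeyErrors: 'resources' must be present, and each disk entry must be
-- readable unless an earlier fully-free disk makes the loop return before reaching it.
def Pre_getFreestDisk (host : List (String × List (String × List (String × List (String × Int))))) : Prop :=
  ((PySem.Dict.ofList host).contains "resources" = true) ∧
  ∀ i : Fin (PySem.Dict.ofList ((PySem.Dict.ofList ((PySem.Dict.ofList host).getD "resources" [])).getD "disks" [])).items.length,
    (∀ j : Fin (PySem.Dict.ofList ((PySem.Dict.ofList ((PySem.Dict.ofList host).getD "resources" [])).getD "disks" [])).items.length,
      j.1 < i.1 → diskFull ((PySem.Dict.ofList ((PySem.Dict.ofList ((PySem.Dict.ofList host).getD "resources" [])).getD "disks" [])).items[j].2) = false) →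
    diskOk ((PySem.Dict.ofList ((PySem.Dict.ofList ((PySem.Dict.ofList host).getD "resources" [])).getD "disks" [])).items[i].2) = true
instance (host : List (String × List (String × List (String × List (String × Int))))) : Decidable (Pre_getFreestDisk host) := by unfold Pre_getFreestDisk; infer_instance

def pvWitness_getFreestDisk : (List (String × List (String × List (String × List (String × Int))))) :=
  [("resources", [("disks", [("sda", [("free", 3), ("max", 10)]), ("sdb", [("free", 0), ("max", 5)])])])]

def Spec_getFreestDisk (host : List (String × List (String × List (String × List (String × Int))))) (out : Option String) : Prop := out = getFreestDisk_alt host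
instance (host : List (String × List (String × List (String × List (String × Int))))) (out : Option String) : Decidable (Spec_getFreestDisk host out) := by unfold Spec_getFreestDisk; infer_instance

-- ===== CLAIM (what is proved, stated in full; the proofs are below) =====
def Claim_equal_getFreestDisk : Prop := ∀ (host : List (String × List (String × List (String × List (String × Int))))), Dom_getFreestDisk host → Pre_getFreestDisk host → Spec_getFreestDisk host (getFreestDisk host)

-- ===== LEMMAS AND PROOFS =====

-- A's interleaved loop equals: first full disk if any, else the max-free scan.
theorem goA_eq_two_pass (items : List (String × List (String × Int))) :
    ∀ best bw, goA items best bw =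
      (match firstFull items with | some n => some n | none => bestBw items best bw) := by
  induction items with
  | nil => intro best bw; rfl
  | cons p rest ih =>
    obtain ⟨n, d⟩ := p
    intro best bw
    by_cases h0 : (PySem.Dict.ofList d).getD "free" 0 = 0
    · have hff : ¬ ((PySem.Dict.ofList d).getD "free" 0 ≠ 0 ∧
          (PySem.Dict.ofList d).getD "free" 0 = (PySem.Dict.ofList d).getD "max" 0) := by
        intro h; exact h.1 h0
      have hbb : ¬ ((PySem.Dict.ofList d).getD "free" 0 ≠ 0 ∧
          (bw = -1 ∨ bw < (PySem.Dict.ofList d).getD "free" 0)) := by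
        intro h; exact h.1 h0
      simp only [goA, firstFull, bestBw, if_pos h0, if_neg hff, if_neg hbb]
      exact ih best bw
    · by_cases hm : (PySem.Dict.ofList d).getD "free" 0 = (PySem.Dict.ofList d).getD "max" 0
      · simp only [goA, firstFull, if_neg h0, if_pos hm, if_pos (And.intro h0 hm)]
      · have hff : ¬ ((PySem.Dict.ofList d).getD "free" 0 ≠ 0 ∧
            (PySem.Dict.ofList d).getD "free" 0 = (PySem.Dict.ofList d).getD "max" 0) := by
          intro h; exact hm h.2
        by_cases hs : bw = -1 ∨ bw < (PySem.Dict.ofList d).getD "free" 0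
        · simp only [goA, firstFull, bestBw, if_neg h0, if_neg hm, if_pos hs, if_neg hff,
            if_pos (And.intro h0 hs)]
          exact ih (some n) _
        · have hbb : ¬ ((PySem.Dict.ofList d).getD "free" 0 ≠ 0 ∧
              (bw = -1 ∨ bw < (PySem.Dict.ofList d).getD "free" 0)) := by
            intro h; exact hs h.2
          simp only [goA, firstFull, bestBw, if_neg h0, if_neg hm, if_neg hs, if_neg hff,
            if_neg hbb]
          exact ih best bw

-- ===== VERDICT (by name: the statement is the Claim_ definition above) =====
theorem getFreestDisk_spec : Claim_equal_getFreestDisk := by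
  intro host _ _
  unfold Spec_getFreestDisk getFreestDisk getFreestDisk_alt
  cases hres : (PySem.Dict.ofList host).get? "resources" with
  | none => rfl
  | some res =>
    simp only []
    rw [PySem.Dict.getD_eq_get?_getD]
    cases hd : (PySem.Dict.ofList res).get? "disks" with
    | none => rfl
    | some disks =>
      simp only [Option.getD_some]
      exact goA_eq_two_pass _ none (-1)
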